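-- pv_equiv track=rewrite | github.com/wrekone/word_triplets | word_triplets_3.py | text_triple_maker
-- ===== SOURCE A (Python) =====
-- def text_triple_maker(arr):
-- 	# Double check this reaches end of text.
-- 	x, y = 0, 3
-- 	triples_list = []
-- 	while y <= len(arr):
-- 		triple = (arr[x:y])
-- 		triple_string = " ".join(triple)
-- 		triples_list.append(triple_string)
-- 		x += 1
-- 		y += 1
-- 	return triples_list
-- ===== SOURCE B (Python) =====
-- def text_triple_maker(arr):
-- 	out = []
-- 	prev1 = prev2 = None
-- 	for w in reversed(arr):
-- 		if prev1 is not None and prev2 is not None: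
-- 			out.append(" ".join([w, prev1, prev2]))
-- 		prev2 = prev1
-- 		prev1 = w
-- 	out.reverse()
-- 	return out
-- ===== Notes on version B (the rewrite author's own statement) =====
-- stated objective: alternative
-- what changed: Replaces the x/y index-pointer loop that repeatedly slices arr[x:y] with a single right-to-left streaming pass that keeps only the two most recently seen words as rolling state, emits each triple from that state, and reverses the collected output at the end.
import Mathlib
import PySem

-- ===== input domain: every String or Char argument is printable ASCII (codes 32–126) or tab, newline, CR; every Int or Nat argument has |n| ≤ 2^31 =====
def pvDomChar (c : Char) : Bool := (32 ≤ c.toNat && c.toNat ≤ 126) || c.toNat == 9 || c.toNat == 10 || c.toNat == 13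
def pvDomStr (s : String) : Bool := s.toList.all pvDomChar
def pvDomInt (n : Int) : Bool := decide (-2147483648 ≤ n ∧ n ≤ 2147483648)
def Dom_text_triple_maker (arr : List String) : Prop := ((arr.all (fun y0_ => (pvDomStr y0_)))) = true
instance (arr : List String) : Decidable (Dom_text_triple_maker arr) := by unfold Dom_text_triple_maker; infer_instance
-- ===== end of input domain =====

-- B replaces A's forward index-pointer loop over slices arr[x:y] by a single
-- right-to-left pass keeping the last two words as rolling state, emitting each
-- triple from that state and reversing the output at the end (alternative; same cost).

-- ===== PORT A =====
-- A's while loop: state x, y, triples_list; each pass appends " ".join(arr[x:y]).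
def ttmLoop (arr : List String) (x y : Int) (acc : List String) : List String :=
  if _h : y ≤ (arr.length : Int) then
    ttmLoop arr (x + 1) (y + 1) (acc ++ [PySem.Str.join " " (PySem.List.slice arr (some x) (some y))])
  else acc
termination_by ((arr.length : Int) + 1 - y).toNat
decreasing_by omega

def text_triple_maker (arr : List String) : List String :=
  ttmLoop arr 0 3 []

-- ===== PORT B =====
-- B's for-loop body over reversed(arr): state (out, prev1, prev2).
def ttmAltStep (st : List String × Option String × Option String) (w : String) :
    List String × Option String × Option String :=
  ((match st.2.1, st.2.2 with
    | some a, some b => st.1 ++ [PySem.Str.join " " [w, a, b]]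
    | _, _ => st.1), some w, st.2.1)

def text_triple_maker_alt (arr : List String) : List String :=
  (arr.reverse.foldl ttmAltStep ([], none, none)).1.reverse

-- ===== PRECONDITION & SPEC =====
def Spec_text_triple_maker (arr : List String) (out : List String) : Prop := out = text_triple_maker_alt arr
instance (arr : List String) (out : List String) : Decidable (Spec_text_triple_maker arr out) := by unfold Spec_text_triple_maker; infer_instance

-- ===== CLAIM (what is proved, stated in full; the proofs are below) =====
def Claim_equal_text_triple_maker : Prop := ∀ (arr : List String), Dom_text_triple_maker arr → Spec_text_triple_maker arr (text_triple_maker arr)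

-- ===== LEMMAS AND PROOFS =====

-- the common reference value: all space-joined windows of three consecutive words
def pvTrips : List String → List String
  | a :: b :: c :: r => PySem.Str.join " " [a, b, c] :: pvTrips (b :: c :: r)
  | _ => []

-- functional form of B's fold (output part only)
def pvF : List String → Option String → Option String → List String
  | [], _, _ => []
  | w :: m, p1, p2 =>
      (match p1, p2 with
       | some a, some b => [PySem.Str.join " " [w, a, b]]
       | _, _ => []) ++ pvF m (some w) p1

lemma foldl_fst (m : List String) : ∀ (out : List String) (p1 p2 : Option String),
    (m.foldl ttmAltStep (out, p1, p2)).1 = out ++ pvF m p1 p2 := by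
  induction m with
  | nil => intro out p1 p2; simp [pvF]
  | cons w m ih =>
    intro out p1 p2
    simp only [List.foldl_cons, ttmAltStep, ih, pvF]
    cases p1 <;> cases p2 <;> simp

lemma trips_snoc (xs : List String) : ∀ (a b c : String),
    pvTrips (xs ++ [a, b, c]) = pvTrips (xs ++ [a, b]) ++ [PySem.Str.join " " [a, b, c]] := by
  induction xs with
  | nil => intro a b c; simp [pvTrips]
  | cons x xs ih =>
    intro a b c
    rcases xs with _ | ⟨y, ys⟩
    · simp [pvTrips]
    · rcases ys with _ | ⟨z, zs⟩ <;>
        simpa [pvTrips] using ih _ _ _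

lemma pvF_main (m : List String) : ∀ (a b : String),
    pvF m (some a) (some b) = (pvTrips (m.reverse ++ [a, b])).reverse := by
  induction m with
  | nil => intro a b; simp [pvF, pvTrips]
  | cons w m ih =>
    intro a b
    have h : (w :: m).reverse ++ [a, b] = m.reverse ++ [w, a, b] := by simp
    rw [h, trips_snoc]
    simp [pvF, ih w a]

lemma alt_eq_trips (arr : List String) : text_triple_maker_alt arr = pvTrips arr := by
  unfold text_triple_maker_alt
  rcases h : arr.reverse with _ | ⟨w, m⟩
  · have : arr = [] := by simpa using congrArg List.reverse h
    simp [this, h, pvF, pvTrips, foldl_fst]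
  · rcases m with _ | ⟨w', m'⟩
    · have : arr = [w] := by simpa using congrArg List.reverse h
      simp [this, foldl_fst, ttmAltStep, pvF, pvTrips]
    · have harr : arr = m'.reverse ++ [w', w] := by
        have := congrArg List.reverse h
        simpa using this
      rw [foldl_fst]
      simp only [pvF, List.nil_append]
      rw [pvF_main m' w' w, harr]
      simp

lemma trips_short (l : List String) (h : l.length < 3) : pvTrips l = [] := by
  rcases l with _ | ⟨a, _ | ⟨b, _ | ⟨c, r⟩⟩⟩
  · rfl
  · rfl
  · rfl
  · simp at h; omega

lemma loop_eq (arr : List String) : ∀ (n x : Nat) (acc : List String), arr.length - x ≤ n →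
    ttmLoop arr (x : Int) ((x : Int) + 3) acc = acc ++ pvTrips (arr.drop x) := by
  intro n
  induction n with
  | zero =>
    intro x acc hn
    rw [ttmLoop]
    have hx : arr.length ≤ x := by omega
    rw [dif_neg (by exact_mod_cast by omega), trips_short _ (by simp; omega), List.append_nil]
  | succ n ih =>
    intro x acc hn
    rw [ttmLoop]
    by_cases h : (x : Int) + 3 ≤ (arr.length : Int)
    · have hlen : x + 3 ≤ arr.length := by exact_mod_cast h
      rw [dif_pos h]
      have h1 : ((x : Int) + 3) = (((x + 3 : Nat)) : Int) := by push_cast; ring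
      have hslice : PySem.List.slice arr (some (x : Int)) (some ((x : Int) + 3)) =
          (arr.drop x).take 3 := by
        rw [h1, PySem.List.slice_natCast]
        congr 1; omega
      have hd : 3 ≤ (arr.drop x).length := by simp; omega
      rcases hl : arr.drop x with _ | ⟨a, _ | ⟨b, _ | ⟨c, r⟩⟩⟩ <;>
        simp [hl] at hd ⊢
      have h2 : ((x : Int) + 1) = (((x + 1 : Nat)) : Int) := by push_cast; ring
      have h3 : ((x : Int) + 3 + 1) = (((x + 1 : Nat)) : Int) + 3 := by push_cast; ring
      rw [h2, h3, ih (x + 1) _ (by omega)]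
      have hd1 : arr.drop (x + 1) = b :: c :: r := by
        have h4 : List.drop 1 (List.drop x arr) = b :: c :: r := by rw [hl]; rfl
        rw [List.drop_drop] at h4
        simpa [Nat.add_comm] using h4
      rw [hd1, hslice, hl]
      simp [pvTrips]
    · rw [dif_neg h, trips_short, List.append_nil]
      have : ¬ (x + 3 ≤ arr.length) := by exact_mod_cast fun hc => h (by exact_mod_cast hc)
      simp; omega

-- ===== VERDICT (by name: the statement is the Claim_ definition above) =====
theorem text_triple_maker_spec : Claim_equal_text_triple_maker := by
  intro arr _
  unfold Spec_text_triple_maker text_triple_maker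
  rw [alt_eq_trips]
  have := loop_eq arr arr.length 0 [] (by omega)
  simpa using this
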